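-- pv_equiv track=rewrite | github.com/anamariapanait10/InterviewSimulatorApp | src/interview-prep-agents/workflow.py | _extract_attachment_links
-- ===== SOURCE A (Python) =====
-- def _extract_attachment_links(message: str) -> tuple[str | None, str | None]:
--     text = message.lower()
--     resume_link: str | None = None
--     job_description_link: str | None = None
--
--     for line in message.splitlines():
--         stripped = line.strip()
--         if not stripped.lower().startswith("attachment url:"):
--             continue
--         value = stripped.split(":", 1)[1].strip()
--         if not value:
--             continue
--
--         if "resume" in text and resume_link is None:
--             resume_link = value
--         elif any(key in text for key in ("job", "jd", "description")) and job_description_link is None: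
--             job_description_link = value
--         elif resume_link is None:
--             resume_link = value
--         elif job_description_link is None:
--             job_description_link = value
--
--     return resume_link, job_description_link
-- ===== SOURCE B (Python) =====
-- def _parse_attachment_value(line: str):
--     stripped = line.strip()
--     if not stripped.lower().startswith("attachment url:"):
--         return None
--     value = stripped.split(":", 1)[1].strip()
--     return value or None
--
--
-- def _extract_attachment_links(message: str) -> tuple:
--     text = message.lower()
--     values = [v for v in map(_parse_attachment_value, message.splitlines()) if v is not None]
--     first = values[0] if len(values) > 0 else None
--     second = values[1] if len(values) > 1 else None
--     has_resume = "resume" in text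
--     has_job = any(key in text for key in ("job", "jd", "description"))
--     if has_resume or not has_job:
--         return first, second
--     return second, first
-- ===== Notes on version B (the rewrite author's own statement) =====
-- stated objective: simpler
-- what changed: B replaces A's stateful loop (four interleaved assignment branches mutating resume/job slots) with a pure parse pass collecting the attachment values, then a single assignment from the first two values, noting that the resume-keyword and no-keyword cases assign identically.
import Mathlib
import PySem

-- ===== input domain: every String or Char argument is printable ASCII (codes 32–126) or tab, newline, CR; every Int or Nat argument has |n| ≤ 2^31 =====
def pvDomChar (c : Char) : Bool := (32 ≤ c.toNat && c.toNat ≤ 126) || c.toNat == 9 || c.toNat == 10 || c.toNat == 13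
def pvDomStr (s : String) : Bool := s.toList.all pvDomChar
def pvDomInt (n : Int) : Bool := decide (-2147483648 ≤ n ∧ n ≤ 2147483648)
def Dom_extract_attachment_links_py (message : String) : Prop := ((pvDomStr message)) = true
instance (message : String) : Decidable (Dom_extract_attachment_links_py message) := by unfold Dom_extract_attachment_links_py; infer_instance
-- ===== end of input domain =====

-- B separates parsing (collect the attachment-URL values) from the assignment decision
-- that A interleaves in its loop state; objective: simpler.


-- ===== PORT A =====
-- the four-branch assignment of A's loop body, on the current (resume, job) state
def pvAUpd (hr hj : Bool) (st : Option String × Option String) (value : String) :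
    Option String × Option String :=
  if hr && st.1.isNone then (some value, st.2)
  else if hj && st.2.isNone then (st.1, some value)
  else if st.1.isNone then (some value, st.2)
  else if st.2.isNone then (st.1, some value)
  else st

-- A's loop body: strip, guard on the prefix, extract the value, guard on emptiness, assign
def pvAStep (text : String) (st : Option String × Option String) (line : String) :
    Option String × Option String :=
  let stripped := PySem.Str.strip line
  if !(PySem.Str.startswith (PySem.Str.lower stripped) "attachment url:") then st
  else
    let value := PySem.Str.strip (((PySem.Str.splitMax? stripped ":" 1).getD []).getD 1 "")
    if value = "" then st
    else
      pvAUpd (PySem.Str.isIn "resume" text)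
        (PySem.Str.isIn "job" text || PySem.Str.isIn "jd" text || PySem.Str.isIn "description" text)
        st value

def extract_attachment_links_py (message : String) : Option String × Option String :=
  let text := PySem.Str.lower message
  (PySem.Str.splitlines message).foldl (pvAStep text) (none, none)

-- ===== PORT B =====
-- B's helper: parse one line to its attachment-URL value, if any
def pvParseAttachment (line : String) : Option String :=
  let stripped := PySem.Str.strip line
  if !(PySem.Str.startswith (PySem.Str.lower stripped) "attachment url:") then none
  else
    let value := PySem.Str.strip (((PySem.Str.splitMax? stripped ":" 1).getD []).getD 1 "")
    if value = "" then none else some value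

def extract_attachment_links_py_alt (message : String) : Option String × Option String :=
  let text := PySem.Str.lower message
  let values := (PySem.Str.splitlines message).filterMap pvParseAttachment
  let first := values[0]?
  let second := values[1]?
  let has_resume := PySem.Str.isIn "resume" text
  let has_job := PySem.Str.isIn "job" text || PySem.Str.isIn "jd" text || PySem.Str.isIn "description" text
  if has_resume || !has_job then (first, second) else (second, first)

-- ===== PRECONDITION & SPEC =====
def Spec_extract_attachment_links_py (message : String) (out : Option String × Option String) : Prop := out = extract_attachment_links_py_alt message
instance (message : String) (out : Option String × Option String) : Decidable (Spec_extract_attachment_links_py message out) := by unfold Spec_extract_attachment_links_py; infer_instance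

-- ===== CLAIM (what is proved, stated in full; the proofs are below) =====
def Claim_equal_extract_attachment_links_py : Prop := ∀ (message : String), Dom_extract_attachment_links_py message → Spec_extract_attachment_links_py message (extract_attachment_links_py message)

-- ===== LEMMAS AND PROOFS =====

-- B's assignment, as a function of the collected values
def pvG (hr hj : Bool) (vs : List String) : Option String × Option String :=
  if hr || !hj then (vs[0]?, vs[1]?) else (vs[1]?, vs[0]?)

theorem pvAStep_eq_parse (text st line) :
    pvAStep text st line =
      match pvParseAttachment line with
      | none => st
      | some v =>
          pvAUpd (PySem.Str.isIn "resume" text)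
            (PySem.Str.isIn "job" text || PySem.Str.isIn "jd" text || PySem.Str.isIn "description" text)
            st v := by
  simp only [pvAStep, pvParseAttachment]
  by_cases h1 : PySem.Str.startswith (PySem.Str.lower (PySem.Str.strip line)) "attachment url:" <;>
    simp only [h1, Bool.not_true, Bool.not_false, if_true, if_false] <;> split_ifs <;> simp

theorem pvAUpd_g (hr hj : Bool) (vs : List String) (v : String) :
    pvAUpd hr hj (pvG hr hj vs) v = pvG hr hj (vs ++ [v]) := by
  rcases vs with _ | ⟨a, _ | ⟨b, t⟩⟩ <;> cases hr <;> cases hj <;>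
    simp [pvAUpd, pvG]

theorem pvFold_g (text : String) (lines vs : List String) :
    lines.foldl (pvAStep text)
        (pvG (PySem.Str.isIn "resume" text)
          (PySem.Str.isIn "job" text || PySem.Str.isIn "jd" text || PySem.Str.isIn "description" text) vs)
      = pvG (PySem.Str.isIn "resume" text)
          (PySem.Str.isIn "job" text || PySem.Str.isIn "jd" text || PySem.Str.isIn "description" text)
          (vs ++ lines.filterMap pvParseAttachment) := by
  induction lines generalizing vs with
  | nil => simp
  | cons l ls ih =>
    rw [List.foldl_cons, pvAStep_eq_parse]
    cases h : pvParseAttachment l with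
    | none =>
      simp only [List.filterMap_cons, h]
      exact ih vs
    | some v =>
      simp only [List.filterMap_cons, h]
      rw [pvAUpd_g, ih (vs ++ [v])]
      simp

-- ===== VERDICT (by name: the statement is the Claim_ definition above) =====
theorem extract_attachment_links_py_spec : Claim_equal_extract_attachment_links_py := by
  intro message _
  unfold Spec_extract_attachment_links_py
  show extract_attachment_links_py message = extract_attachment_links_py_alt message
  unfold extract_attachment_links_py extract_attachment_links_py_alt
  have h0 : ∀ hr hj : Bool, pvG hr hj [] = ((none : Option String), (none : Option String)) := by
    intro hr hj; cases hr <;> cases hj <;> simp [pvG]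
  rw [← h0 (PySem.Str.isIn "resume" (PySem.Str.lower message))
        (PySem.Str.isIn "job" (PySem.Str.lower message) || PySem.Str.isIn "jd" (PySem.Str.lower message) || PySem.Str.isIn "description" (PySem.Str.lower message)),
      pvFold_g]
  simp [pvG]
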